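-- pv_equiv track=rewrite | github.com/goldilock-zone/IdeaGraph | circle_project/circle_app/utils.py | delete_node_and_children
-- ===== SOURCE A (Python) =====
-- def delete_node_and_children(adj_list, node):
--     if node not in adj_list:
--         return adj_list  # Node not found in the graph, nothing to delete
--
--     # Recursively delete the node and its children
--     def delete_recursive(current_node):
--         if current_node in adj_list:
--             for neighbor in adj_list[current_node]:
--                 delete_recursive(neighbor)
--             del adj_list[current_node]
--
--     delete_recursive(node)
--     # Remove references to the deleted node from other nodes' adjacency lists
--     for key in adj_list:
--         adj_list[key] = [neighbor for neighbor in adj_list[key] if neighbor != node]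
--
--     return adj_list
-- ===== SOURCE B (Python) =====
-- def delete_node_and_children(adj_list, node):
--     # Iterative re-implementation: explicit stack + visited set instead of the
--     # recursive interleaved-deletion helper; then delete the collected set and
--     # strip references to `node` exactly as A does. Mutates adj_list in place
--     # like A (same final state); equivalence claimed about the return value.
--     if node not in adj_list:
--         return adj_list  # Node not found in the graph, nothing to delete
--     to_delete = set()
--     stack = [node]
--     while stack:
--         cur = stack.pop()
--         if cur in adj_list and cur not in to_delete:
--             to_delete.add(cur)
--             stack.extend(adj_list[cur])
--     for n in to_delete:
--         del adj_list[n]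
--     for key in adj_list:
--         adj_list[key] = [nb for nb in adj_list[key] if nb != node]
--     return adj_list
-- ===== Notes on version B (the rewrite author's own statement) =====
-- stated objective: alternative
-- what changed: Replaces the recursive helper that interleaves dict deletion with traversal by an explicit stack + visited-set pass that first collects the reachable set, then deletes it and strips node references (on reachable cycles, where A's recursion never returns, B terminates); B performs the same in-place mutation and the equivalence is about the returned dict.
import Mathlib
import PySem

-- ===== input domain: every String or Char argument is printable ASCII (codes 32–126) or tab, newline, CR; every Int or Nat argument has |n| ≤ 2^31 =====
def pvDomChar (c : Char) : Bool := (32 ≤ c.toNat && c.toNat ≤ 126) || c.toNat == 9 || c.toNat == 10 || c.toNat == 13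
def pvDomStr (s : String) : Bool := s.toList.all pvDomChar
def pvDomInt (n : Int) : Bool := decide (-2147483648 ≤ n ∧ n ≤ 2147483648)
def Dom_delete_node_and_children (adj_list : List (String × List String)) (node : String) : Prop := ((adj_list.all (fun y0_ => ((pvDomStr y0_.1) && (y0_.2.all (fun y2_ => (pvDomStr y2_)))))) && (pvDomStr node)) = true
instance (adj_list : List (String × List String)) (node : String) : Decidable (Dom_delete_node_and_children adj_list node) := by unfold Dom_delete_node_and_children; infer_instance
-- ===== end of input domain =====

-- B replaces A's recursive delete-while-traversing helper by an explicit stack +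
-- visited-set collection pass followed by one deletion pass (alternative
-- decomposition, same cost); both mutate the dict in place in Python and the
-- equivalence proved here is about the returned dict.

-- ===== PORT A =====
-- dict keys (insertion order) and dict lookup with [] default (A only looks up present keys)
def pvKeys (d : List (String × List String)) : List String := d.map Prod.fst

def pvGet (d : List (String × List String)) (k : String) : List String :=
  match d.find? (fun p => p.1 == k) with
  | some p => p.2
  | none => []

-- `delete_recursive`: Python recursion has no fuel; the fuel argument only makes the
-- recursion structural and is chosen (adj_list.length + 1) so that it provably never
-- runs out on inputs satisfying Pre_ (A diverges exactly on the excluded cyclic inputs).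
def delRecA : Nat → List (String × List String) → String → List (String × List String)
  | 0, d, _ => d
  | f+1, d, cur =>
    if (pvKeys d).contains cur then
      ((pvGet d cur).foldl (fun acc nb => delRecA f acc nb) d).filter (fun p => !(p.1 == cur))
    else d

def delete_node_and_children (adj_list : List (String × List String)) (node : String) : List (String × List String) :=
  if (pvKeys adj_list).contains node then
    let d' := delRecA (adj_list.length + 1) adj_list node
    -- for key in adj_list: adj_list[key] = [nb for nb in adj_list[key] if nb != node]
    d'.map (fun p => (p.1, p.2.filter (fun nb => !(nb == node))))
  else adj_list

-- ===== PORT B =====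
-- fuel for the while loop: every push is accounted for by one key entering to_delete,
-- so total pops ≤ 1 + Σ(1+|adj[k]|); provably sufficient (the Python loop always terminates).
def fuelB (d : List (String × List String)) : Nat :=
  d.length + (d.map (fun p => p.2.length)).sum + 1

-- while stack: cur = stack.pop(); if cur in adj_list and cur not in to_delete: …
-- (Python pops from the END; the head-of-list stack with reversed neighbours mirrors that)
def collectB : Nat → List (String × List String) → List String → PySem.Set String → PySem.Set String
  | 0, _, _, td => td
  | f+1, d, stack, td =>
    match stack with
    | [] => td
    | cur :: rest =>
      if (pvKeys d).contains cur && !(PySem.Set.contains td cur) then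
        collectB f d ((pvGet d cur).reverse ++ rest) (PySem.Set.add td cur)
      else
        collectB f d rest td

def delete_node_and_children_alt (adj_list : List (String × List String)) (node : String) : List (String × List String) :=
  if (pvKeys adj_list).contains node then
    let td := collectB (fuelB adj_list) adj_list [node] PySem.Set.empty
    -- for n in to_delete: del adj_list[n]   (result independent of set order)
    let d' := td.foldl (fun acc n => acc.filter (fun p => !(p.1 == n))) adj_list
    d'.map (fun p => (p.1, p.2.filter (fun nb => !(nb == node))))
  else adj_list

-- ===== PRECONDITION & SPEC =====
-- reachable-key closure, for stating Pre_ checkably: BFS-style saturation, different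
-- from both ports' traversals (adj_list.length + 1 expansion rounds reach the fixpoint)
def pvStep (d : List (String × List String)) (S : List String) : List String :=
  S ++ ((S.flatMap (fun a => pvGet d a)).filter
          (fun b => (pvKeys d).contains b && !(S.contains b))).dedup

def pvIter (d : List (String × List String)) : Nat → List String → List String
  | 0, S => S
  | n+1, S => pvIter d n (pvStep d S)

def pvReach (d : List (String × List String)) (a : String) : List String :=
  pvIter d (d.length + 1) (if (pvKeys d).contains a then [a] else [])

-- Pre_ excludes (i) graphs in which a cycle among keys is reachable from node — there
-- the Python A never returns (RecursionError) — and (ii) association lists with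
-- duplicate keys, which cannot arise from a Python dict argument.
def Pre_delete_node_and_children (adj_list : List (String × List String)) (node : String) : Prop :=
  (pvKeys adj_list).Nodup ∧
  ∀ k ∈ pvReach adj_list node, ∀ nb ∈ pvGet adj_list k, k ∉ pvReach adj_list nb

instance (adj_list : List (String × List String)) (node : String) : Decidable (Pre_delete_node_and_children adj_list node) := by
  unfold Pre_delete_node_and_children; infer_instance

def pvWitness_delete_node_and_children : (List (String × List String)) × String :=
  ([("a", ["b", "c"]), ("b", ["c"]), ("c", []), ("d", ["a"])], "a")

def Spec_delete_node_and_children (adj_list : List (String × List String)) (node : String) (out : List (String × List String)) : Prop := out = delete_node_and_children_alt adj_list node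
instance (adj_list : List (String × List String)) (node : String) (out : List (String × List String)) : Decidable (Spec_delete_node_and_children adj_list node out) := by unfold Spec_delete_node_and_children; infer_instance

-- ===== CLAIM (what is proved, stated in full; the proofs are below) =====
def Claim_equal_delete_node_and_children : Prop := ∀ (adj_list : List (String × List String)) (node : String), Dom_delete_node_and_children adj_list node → Pre_delete_node_and_children adj_list node → Spec_delete_node_and_children adj_list node (delete_node_and_children adj_list node)


-- ===== LEMMAS AND PROOFS =====

-- Reachability through keys: every node on the path (source and target included) is a key.
inductive PR (d : List (String × List String)) : String → String → Prop
  | refl (a : String) (h : (pvKeys d).contains a = true) : PR d a a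
  | step (a b c : String) (ha : (pvKeys d).contains a = true) (hb : b ∈ pvGet d a)
      (hbc : PR d b c) : PR d a c

theorem PR_src_key {d : List (String × List String)} {a c : String} (h : PR d a c) :
    (pvKeys d).contains a = true := by cases h <;> assumption

theorem PR_dst_key {d : List (String × List String)} {a c : String} (h : PR d a c) :
    (pvKeys d).contains c = true := by induction h <;> assumption

theorem PR_trans {d : List (String × List String)} {a b c : String}
    (h1 : PR d a b) (h2 : PR d b c) : PR d a c := by
  induction h1 with
  | refl => exact h2
  | step a x b ha hx _ ih => exact PR.step a x c ha hx (ih h2)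

theorem PR_snoc {d : List (String × List String)} {a b c : String}
    (h : PR d a b) (hc : c ∈ pvGet d b) (hk : (pvKeys d).contains c = true) : PR d a c := by
  induction h with
  | refl x hx => exact PR.step x c c hx hc (PR.refl c hk)
  | step x y z hx hy _ ih => exact PR.step x y c hx hy (ih hc)

theorem PR_unfold {d : List (String × List String)} {cur x : String}
    (hk : (pvKeys d).contains cur = true) :
    PR d cur x ↔ x = cur ∨ ∃ nb ∈ pvGet d cur, PR d nb x := by
  constructor
  · intro h
    cases h with
    | refl => exact Or.inl rfl
    | step a b c ha hb hbc => exact Or.inr ⟨b, hb, hbc⟩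
  · rintro (rfl | ⟨nb, h1, h2⟩)
    · exact PR.refl _ hk
    · exact PR.step _ _ _ hk h1 h2

-- ---- list cardinality helpers ----
theorem nodup_len_lt {S' S : List String} (h' : S'.Nodup) (h : S.Nodup)
    (hsub : ∀ x ∈ S', x ∈ S) (a : String) (ha : a ∈ S) (ha' : a ∉ S') :
    S'.length < S.length := by
  rw [← List.toFinset_card_of_nodup h', ← List.toFinset_card_of_nodup h]
  apply Finset.card_lt_card
  constructor
  · intro x hx
    simp only [List.mem_toFinset] at *
    exact hsub x hx
  · intro hcon
    have := hcon (List.mem_toFinset.mpr ha)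
    exact ha' (List.mem_toFinset.mp this)

theorem nodup_len_le {S T : List String} (h : S.Nodup) (hsub : ∀ x ∈ S, x ∈ T) :
    S.length ≤ T.length := by
  calc S.length = S.toFinset.card := (List.toFinset_card_of_nodup h).symm
    _ ≤ T.toFinset.card := Finset.card_le_card (by
        intro x hx
        exact List.mem_toFinset.mpr (hsub x (List.mem_toFinset.mp hx)))
    _ ≤ T.length := T.toFinset_card_le

-- ---- pvReach correctness (saturation of the step operator) ----
theorem pvIter_fix {d : List (String × List String)} {S : List String}
    (h : pvStep d S = S) : ∀ n, pvIter d n S = S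
  | 0 => rfl
  | n+1 => by rw [pvIter, h]; exact pvIter_fix h n

theorem pvIter_add (d : List (String × List String)) (m n : Nat) (S : List String) :
    pvIter d (m + n) S = pvIter d n (pvIter d m S) := by
  induction m generalizing S with
  | zero => rw [Nat.zero_add]; rfl
  | succ m ih =>
    have : m + 1 + n = (m + n) + 1 := by omega
    rw [this]
    show pvIter d (m + n) (pvStep d S) = pvIter d n (pvIter d m (pvStep d S))
    exact ih (pvStep d S)

theorem pvStep_supset {d : List (String × List String)} {S : List String} :
    ∀ x ∈ S, x ∈ pvStep d S := by
  intro x hx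
  exact List.mem_append.mpr (Or.inl hx)

theorem pvIter_supset {d : List (String × List String)} (n : Nat) {S : List String} :
    ∀ x ∈ S, x ∈ pvIter d n S := by
  induction n generalizing S with
  | zero => intro x hx; exact hx
  | succ n ih => intro x hx; exact ih x (pvStep_supset x hx)

def Pinv (d : List (String × List String)) (S : List String) : Prop :=
  S.Nodup ∧ ∀ x ∈ S, (pvKeys d).contains x = true

theorem mem_chunk {d : List (String × List String)} {S : List String} {x : String} :
    x ∈ ((S.flatMap (fun a => pvGet d a)).filter
          (fun b => (pvKeys d).contains b && !(S.contains b))).dedup ↔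
      (∃ y ∈ S, x ∈ pvGet d y) ∧ (pvKeys d).contains x = true ∧ x ∉ S := by
  rw [List.mem_dedup, List.mem_filter, List.mem_flatMap]
  constructor
  · rintro ⟨h1, h2⟩
    rcases Bool.and_eq_true _ _ |>.mp h2 with ⟨h3, h4⟩
    refine ⟨h1, h3, ?_⟩
    intro hm
    rw [List.contains_iff_mem.mpr hm] at h4
    cases h4
  · rintro ⟨h1, h2, h3⟩
    refine ⟨h1, ?_⟩
    rw [h2]
    have : S.contains x = false := by
      cases hq : S.contains x
      · rfl
      · exact absurd (List.contains_iff_mem.mp hq) h3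
    rw [this]
    rfl

theorem pvStep_P {d : List (String × List String)} {S : List String} (h : Pinv d S) :
    Pinv d (pvStep d S) := by
  constructor
  · refine List.Nodup.append h.1 (List.nodup_dedup _) ?_
    intro a ha hchunk
    exact (mem_chunk.mp hchunk).2.2 ha
  · intro x hx
    rcases List.mem_append.mp hx with h1 | h1
    · exact h.2 x h1
    · exact (mem_chunk.mp h1).2.1

theorem pvIter_P {d : List (String × List String)} (n : Nat) {S : List String}
    (h : Pinv d S) : Pinv d (pvIter d n S) := by
  induction n generalizing S with
  | zero => exact h
  | succ n ih => exact ih (pvStep_P h)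

theorem pvStep_sound {d : List (String × List String)} {a : String} {S : List String}
    (h : ∀ x ∈ S, PR d a x) : ∀ x ∈ pvStep d S, PR d a x := by
  intro x hx
  rcases List.mem_append.mp hx with h1 | h1
  · exact h x h1
  · obtain ⟨⟨y, hy, hxy⟩, hkx, _⟩ := mem_chunk.mp h1
    exact PR_snoc (h y hy) hxy hkx

theorem pvIter_sound {d : List (String × List String)} {a : String} (n : Nat)
    {S : List String} (h : ∀ x ∈ S, PR d a x) : ∀ x ∈ pvIter d n S, PR d a x := by
  induction n generalizing S with
  | zero => exact h
  | succ n ih => exact ih (pvStep_sound h)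

theorem pvStep_grow {d : List (String × List String)} {S : List String}
    (hne : pvStep d S ≠ S) : S.length + 1 ≤ (pvStep d S).length := by
  rcases hc : ((S.flatMap (fun a => pvGet d a)).filter
      (fun b => (pvKeys d).contains b && !(S.contains b))).dedup with _ | ⟨c, cs⟩
  · exfalso
    apply hne
    show S ++ _ = S
    rw [hc, List.append_nil]
  · show S.length + 1 ≤ (S ++ _).length
    rw [List.length_append, hc]
    simp

theorem grow_chain {d : List (String × List String)} {S0 : List String} :
    ∀ m, (∀ j < m, pvStep d (pvIter d j S0) ≠ pvIter d j S0) →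
      S0.length + m ≤ (pvIter d m S0).length := by
  intro m
  induction m with
  | zero => intro _; simp [pvIter]
  | succ m ih =>
    intro h
    have h1 := ih (fun j hj => h j (by omega))
    have h2 : pvIter d (m + 1) S0 = pvStep d (pvIter d m S0) := by
      rw [pvIter_add d m 1 S0]; rfl
    have h3 := pvStep_grow (h m (by omega))
    rw [h2]
    omega

theorem exists_fixpoint {d : List (String × List String)} {S0 : List String}
    (hP : Pinv d S0) :
    ∃ j ≤ d.length + 1, pvStep d (pvIter d j S0) = pvIter d j S0 := by
  by_contra hcon
  simp only [not_exists, not_and] at hcon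
  have hgrow := grow_chain (d := d) (S0 := S0) (d.length + 1)
    (fun j hj => hcon j (by omega))
  have hPit := pvIter_P (d.length + 1) hP
  have hle : (pvIter d (d.length + 1) S0).length ≤ d.length := by
    have := nodup_len_le hPit.1
      (fun x hx => List.contains_iff_mem.mp (hPit.2 x hx))
    simp only [pvKeys, List.length_map] at this
    exact this
  omega

theorem pvReach_iff {d : List (String × List String)} {a x : String} :
    x ∈ pvReach d a ↔ PR d a x := by
  by_cases hk : (pvKeys d).contains a = true
  · rw [pvReach, if_pos hk]
    constructor
    · intro hx
      refine pvIter_sound (d.length + 1) ?_ x hx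
      intro y hy
      rcases List.mem_cons.mp hy with h1 | h1
      · rw [h1]; exact PR.refl a hk
      · cases h1
    · intro hpr
      obtain ⟨j, hj, hfix⟩ := exists_fixpoint (d := d) (S0 := [a])
        ⟨List.nodup_singleton a, by intro y hy; rcases List.mem_cons.mp hy with h1 | h1
                                    · rw [h1]; exact hk
                                    · cases h1⟩
      have hF : pvIter d (d.length + 1) [a] = pvIter d j [a] := by
        have : d.length + 1 = j + (d.length + 1 - j) := by omega
        rw [this, pvIter_add, pvIter_fix hfix]
      rw [hF]
      -- the fixed point is step-closed; run the path
      have hclosed : ∀ y ∈ pvIter d j [a], ∀ b ∈ pvGet d y,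
          (pvKeys d).contains b = true → b ∈ pvIter d j [a] := by
        intro y hy b hb hkb
        by_cases hbF : b ∈ pvIter d j [a]
        · exact hbF
        · rw [← hfix]
          exact List.mem_append.mpr (Or.inr (mem_chunk.mpr ⟨⟨y, hy, hb⟩, hkb, hbF⟩))
      have ha0 : a ∈ pvIter d j [a] := pvIter_supset j a (by simp)
      have hrun : ∀ s y, PR d s y → s ∈ pvIter d j [a] → y ∈ pvIter d j [a] := by
        intro s y h
        induction h with
        | refl => intro h0; exact h0
        | step s b c hs hb hbc ih =>
          intro h0
          exact ih (hclosed s h0 b hb (PR_src_key hbc))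
      exact hrun a x hpr ha0
  · rw [pvReach, if_neg hk]
    have hnil : pvStep d ([] : List String) = [] := rfl
    rw [pvIter_fix hnil]
    constructor
    · intro h; cases h
    · intro h; exact absurd (PR_src_key h) hk

-- ---- filtered-dict plumbing ----
theorem pvKeys_filter (d : List (String × List String)) (U : List String) :
    pvKeys (d.filter (fun p => !(U.contains p.1))) =
      (pvKeys d).filter (fun a => !(U.contains a)) := by
  simp only [pvKeys]
  rw [List.filter_map]
  rfl

theorem pvGet_cons (p : String × List String) (t : List (String × List String)) (a : String) :
    pvGet (p :: t) a = if (p.1 == a) = true then p.2 else pvGet t a := by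
  simp only [pvGet, List.find?_cons]
  by_cases h : (p.1 == a) = true
  · rw [h, if_pos rfl]
  · rw [Bool.of_not_eq_true h, if_neg (by simp)]

theorem pvGet_filter {d : List (String × List String)} {U : List String} {a : String}
    (h : U.contains a = false) :
    pvGet (d.filter (fun p => !(U.contains p.1))) a = pvGet d a := by
  induction d with
  | nil => rfl
  | cons p t ih =>
    by_cases hu : U.contains p.1 = true
    · have hpa : (p.1 == a) = false := by
        cases hq : (p.1 == a)
        · rfl
        · have : p.1 = a := by simpa using hq
          rw [this] at hu; rw [hu] at h; exact absurd h (by simp)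
      rw [List.filter_cons_of_neg (by simpa using List.contains_iff_mem.mp hu), ih, pvGet_cons,
        if_neg (by simp [hpa])]
    · rw [List.filter_cons_of_pos
        (by simpa using fun hm => hu (List.contains_iff_mem.mpr hm)), pvGet_cons, pvGet_cons, ih]

theorem PR_mono {d : List (String × List String)} {U : List String} {s x : String}
    (h : PR (d.filter (fun p => !(U.contains p.1))) s x) : PR d s x := by
  induction h with
  | refl a ha =>
    rw [pvKeys_filter] at ha
    have := List.of_mem_filter (List.contains_iff_mem.mp ha)
    exact PR.refl a (List.contains_iff_mem.mpr (List.mem_of_mem_filter (List.contains_iff_mem.mp ha)))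
  | step a b c ha hb _ ih =>
    rw [pvKeys_filter] at ha
    have hmem := List.contains_iff_mem.mp ha
    have ha' : (pvKeys d).contains a = true := List.contains_iff_mem.mpr (List.mem_of_mem_filter hmem)
    have hU : U.contains a = false := by
      have := List.of_mem_filter hmem
      simpa using this
    rw [pvGet_filter hU] at hb
    exact PR.step a b c ha' hb ih

def FwdClosed (d : List (String × List String)) (U : List String) : Prop :=
  ∀ u ∈ U, ∀ y, PR d u y → y ∈ U

theorem PR_drop {d : List (String × List String)} {U : List String} {s x : String}
    (hU : FwdClosed d U) (h : PR d s x) :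
    x ∈ U ∨ PR (d.filter (fun p => !(U.contains p.1))) s x := by
  induction h with
  | refl a ha =>
    by_cases hU : a ∈ U
    · exact Or.inl hU
    · refine Or.inr (PR.refl a ?_)
      rw [pvKeys_filter]
      refine List.contains_iff_mem.mpr (List.mem_filter.mpr ⟨List.contains_iff_mem.mp ha, ?_⟩)
      simpa using hU
  | step a b c ha hb hbc ih =>
    by_cases haU : a ∈ U
    · exact Or.inl (hU a haU c (PR.step a b c ha hb hbc))
    · rcases ih with hxU | hacc
      · exact Or.inl hxU
      · have hbk : (pvKeys d).contains b = true := PR_src_key hbc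
        have hbU : b ∉ U := by
          have := PR_src_key hacc
          rw [pvKeys_filter] at this
          have := List.of_mem_filter (List.contains_iff_mem.mp this)
          simpa using this
        have hUa : U.contains a = false := by simpa using haU
        refine Or.inr (PR.step a b c ?_ ?_ hacc)
        · rw [pvKeys_filter]
          refine List.contains_iff_mem.mpr (List.mem_filter.mpr ⟨List.contains_iff_mem.mp ha, ?_⟩)
          simpa using haU
        · rw [pvGet_filter hUa]; exact hb

-- ---- the collector (B's loop) computes reachability ----
def Closed2 (d : List (String × List String)) (td stack : List String) : Prop :=
  ∀ a ∈ td, ∀ nb ∈ pvGet d a, (pvKeys d).contains nb = true → (nb ∈ td ∨ nb ∈ stack)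

def Wgt (d : List (String × List String)) (td : List String) : Nat :=
  ((d.filter (fun p => !(td.contains p.1))).map (fun p => p.2.length + 1)).sum

theorem collectB_nodup (f : Nat) (d : List (String × List String)) (stack td : List String)
    (h : td.Nodup) : (collectB f d stack td).Nodup := by
  induction f generalizing stack td with
  | zero => exact h
  | succ f ih =>
    cases stack with
    | nil => exact h
    | cons cur rest =>
      simp only [collectB]
      split
      · exact ih _ _ (PySem.Set.nodup_add _ _ h)
      · exact ih _ _ h

theorem collectB_keys (f : Nat) (d : List (String × List String)) (stack td : List String)
    (h : ∀ a ∈ td, (pvKeys d).contains a = true) :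
    ∀ x ∈ collectB f d stack td, (pvKeys d).contains x = true := by
  induction f generalizing stack td with
  | zero => exact h
  | succ f ih =>
    cases stack with
    | nil => exact h
    | cons cur rest =>
      simp only [collectB]
      split
      · rename_i hg
        refine ih _ _ ?_
        intro a hmem
        rcases (PySem.Set.mem_add _ _ _).mp hmem with h1 | rfl
        · exact h a h1
        · exact (Bool.and_eq_true _ _ |>.mp hg).1
      · exact ih _ _ h

theorem Wgt_cons (p : String × List String) (t : List (String × List String)) (td : List String) :
    Wgt (p :: t) td = (if td.contains p.1 = true then 0 else p.2.length + 1) + Wgt t td := by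
  simp only [Wgt]
  by_cases h : td.contains p.1 = true
  · rw [List.filter_cons_of_neg (by simpa using List.contains_iff_mem.mp h), if_pos h]
    omega
  · rw [List.filter_cons_of_pos (by simpa using fun hm => h (List.contains_iff_mem.mpr hm)), if_neg h]
    simp

theorem Wgt_irrel (d : List (String × List String)) (td : List String) (cur : String)
    (h : (pvKeys d).contains cur = false) : Wgt d (td ++ [cur]) = Wgt d td := by
  induction d with
  | nil => rfl
  | cons p t ih =>
    simp only [pvKeys, List.map_cons, List.contains_cons, Bool.or_eq_false_iff] at h
    rw [Wgt_cons, Wgt_cons, ih h.2]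
    have hne : (p.1 == cur) = false := by
      cases hq : (p.1 == cur)
      · rfl
      · have : p.1 = cur := by simpa using hq
        rw [← this] at h
        simp at h
    have : (td ++ [cur]).contains p.1 = td.contains p.1 := by
      rw [List.contains_append]
      simp only [List.contains_cons, List.contains_nil, Bool.or_false]
      rw [hne, Bool.or_false]
    rw [this]

theorem Wgt_erase (d : List (String × List String)) (td : List String) (cur : String)
    (hnd : (pvKeys d).Nodup) (hk : (pvKeys d).contains cur = true) (hcur : cur ∉ td) :
    Wgt d (td ++ [cur]) + ((pvGet d cur).length + 1) = Wgt d td := by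
  induction d with
  | nil => simp [pvKeys] at hk
  | cons p t ih =>
    simp only [pvKeys, List.map_cons, List.nodup_cons] at hnd
    by_cases hp : (p.1 == cur) = true
    · have hpc : p.1 = cur := by simpa using hp
      have htk : td.contains p.1 = false := by
        rw [hpc]; simpa using hcur
      have h1 : (td ++ [cur]).contains p.1 = true := by
        simp only [List.contains_append]
        simp only [List.contains_cons, List.contains_nil, Bool.or_false, hp, Bool.or_true]
      have h2 : (pvKeys t).contains cur = false := by
        rw [← hpc]
        cases hq : (pvKeys t).contains p.1
        · rfl
        · exact absurd (List.contains_iff_mem.mp hq) hnd.1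
      rw [Wgt_cons, Wgt_cons, if_pos h1, if_neg (by rw [htk]; simp), pvGet_cons, if_pos hp,
        Wgt_irrel t td cur h2]
      omega
    · have hk' : (pvKeys t).contains cur = true := by
        simp only [pvKeys, List.map_cons, List.contains_cons] at hk
        rcases Bool.or_eq_true _ _ |>.mp hk with h1 | h1
        · exfalso
          have hcp : cur = p.1 := by simpa using h1
          exact hp (by rw [← hcp]; simp)
        · exact h1
      have hca : (td ++ [cur]).contains p.1 = td.contains p.1 := by
        rw [List.contains_append]
        simp only [List.contains_cons, List.contains_nil, Bool.or_false]
        rw [Bool.of_not_eq_true hp, Bool.or_false]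
      rw [Wgt_cons, Wgt_cons, hca, pvGet_cons, if_neg hp]
      have := ih hnd.2 hk'
      omega

-- once a node is in to_delete, everything it reaches is in to_delete or reachable from the stack
theorem closed_reach {d : List (String × List String)} {td rest : List String}
    (hcl : Closed2 d td rest) :
    ∀ a x, PR d a x → a ∈ td → x ∈ td ∨ ∃ s ∈ rest, PR d s x := by
  intro a x h
  induction h with
  | refl a ha => intro hmem; exact Or.inl hmem
  | step a b c ha hb hbc ih =>
    intro hmem
    have hbk : (pvKeys d).contains b = true := PR_src_key hbc
    rcases hcl a hmem b hb hbk with h1 | h1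
    · exact ih h1
    · exact Or.inr ⟨b, h1, hbc⟩

theorem collectB_mem (f : Nat) (d : List (String × List String)) (stack td : List String)
    (hnd : (pvKeys d).Nodup) (htd : ∀ a ∈ td, (pvKeys d).contains a = true)
    (hcl : Closed2 d td stack) (hf : stack.length + Wgt d td ≤ f) (x : String) :
    x ∈ collectB f d stack td ↔ x ∈ td ∨ ∃ s ∈ stack, PR d s x := by
  induction f generalizing stack td with
  | zero =>
    have : stack = [] := List.eq_nil_of_length_eq_zero (by omega)
    subst this
    simp [collectB]
  | succ f ih =>
    cases stack with
    | nil => simp [collectB]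
    | cons cur rest =>
      simp only [collectB]
      split
      · rename_i hg
        have hk : (pvKeys d).contains cur = true := (Bool.and_eq_true _ _ |>.mp hg).1
        have hcur : cur ∉ td := by
          have := (Bool.and_eq_true _ _ |>.mp hg).2
          intro hc
          rw [(PySem.Set.contains_iff _ _).mpr hc] at this
          simp at this
        have hadd : PySem.Set.add td cur = td ++ [cur] := PySem.Set.add_of_not_mem hcur
        rw [hadd]
        have htd' : ∀ a ∈ td ++ [cur], (pvKeys d).contains a = true := by
          intro a ha
          rcases List.mem_append.mp ha with h1 | h1
          · exact htd a h1
          · simp at h1; subst h1; exact hk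
        have hcl' : Closed2 d (td ++ [cur]) ((pvGet d cur).reverse ++ rest) := by
          intro a ha nb hnb hknb
          rcases List.mem_append.mp ha with h1 | h1
          · rcases hcl a h1 nb hnb hknb with h2 | h2
            · exact Or.inl (List.mem_append.mpr (Or.inl h2))
            · rcases List.mem_cons.mp h2 with h3 | h3
              · subst h3; exact Or.inl (List.mem_append.mpr (Or.inr (by simp)))
              · exact Or.inr (List.mem_append.mpr (Or.inr h3))
          · simp only [List.mem_singleton] at h1
            subst h1
            exact Or.inr (List.mem_append.mpr (Or.inl (List.mem_reverse.mpr hnb)))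
        have hW := Wgt_erase d td cur hnd hk hcur
        have hf' : ((pvGet d cur).reverse ++ rest).length + Wgt d (td ++ [cur]) ≤ f := by
          simp only [List.length_append, List.length_reverse, List.length_cons] at *
          omega
        rw [ih _ _ htd' hcl' hf']
        constructor
        · rintro (h1 | ⟨s, hs, hps⟩)
          · rcases List.mem_append.mp h1 with h2 | h2
            · exact Or.inl h2
            · simp only [List.mem_singleton] at h2
              exact Or.inr ⟨cur, List.mem_cons_self, by rw [h2]; exact PR.refl cur hk⟩
          · rcases List.mem_append.mp hs with h2 | h2
            · exact Or.inr ⟨cur, List.mem_cons_self,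
                PR.step cur s x hk (List.mem_reverse.mp h2) hps⟩
            · exact Or.inr ⟨s, List.mem_cons_of_mem _ h2, hps⟩
        · rintro (h1 | ⟨s, hs, hps⟩)
          · exact Or.inl (List.mem_append.mpr (Or.inl h1))
          · rcases List.mem_cons.mp hs with h2 | h2
            · subst h2
              rcases (PR_unfold hk).mp hps with rfl | ⟨nb, hnb, hpnb⟩
              · exact Or.inl (List.mem_append.mpr (Or.inr (by simp)))
              · exact Or.inr ⟨nb, List.mem_append.mpr (Or.inl (List.mem_reverse.mpr hnb)), hpnb⟩
            · exact Or.inr ⟨s, List.mem_append.mpr (Or.inr h2), hps⟩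
      · rename_i hg
        have hor : (pvKeys d).contains cur = false ∨ cur ∈ td := by
          by_cases h1 : (pvKeys d).contains cur = true
          · right
            by_contra h2
            have : PySem.Set.contains td cur = false := by
              cases hq : PySem.Set.contains td cur
              · rfl
              · exact absurd ((PySem.Set.contains_iff _ _).mp hq) h2
            exact hg (by rw [h1, this]; rfl)
          · exact Or.inl (by simpa using h1)
        have hcl' : Closed2 d td rest := by
          intro a ha nb hnb hknb
          rcases hcl a ha nb hnb hknb with h1 | h1
          · exact Or.inl h1
          · rcases List.mem_cons.mp h1 with h2 | h2
            · subst h2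
              rcases hor with h3 | h3
              · rw [hknb] at h3; cases h3
              · exact Or.inl h3
            · exact Or.inr h2
        have hf' : rest.length + Wgt d td ≤ f := by
          simp only [List.length_cons] at hf; omega
        rw [ih _ _ htd hcl' hf']
        constructor
        · rintro (h1 | ⟨s, hs, hps⟩)
          · exact Or.inl h1
          · exact Or.inr ⟨s, by simp [hs], hps⟩
        · rintro (h1 | ⟨s, hs, hps⟩)
          · exact Or.inl h1
          · rcases List.mem_cons.mp hs with h2 | h2
            · rw [h2] at hps
              rcases hor with h3 | h3
              · rw [PR_src_key hps] at h3; cases h3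
              · exact closed_reach hcl' cur x hps h3
            · exact Or.inr ⟨s, h2, hps⟩

def tdL (d : List (String × List String)) (c : String) : List String :=
  collectB (fuelB d) d [c] PySem.Set.empty

theorem Wgt_nil (d : List (String × List String)) :
    Wgt d [] = (d.map (fun p => p.2.length)).sum + d.length := by
  induction d with
  | nil => rfl
  | cons p t ih =>
    rw [Wgt_cons, if_neg (by simp)]
    simp only [List.map_cons, List.sum_cons, List.length_cons, ih]
    omega

theorem tdL_mem {d : List (String × List String)} {c x : String}
    (hnd : (pvKeys d).Nodup) : x ∈ tdL d c ↔ PR d c x := by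
  unfold tdL
  rw [collectB_mem _ _ _ _ hnd (by intro a ha; simp [PySem.Set.empty] at ha)
    (by intro a ha nb _ _; simp [PySem.Set.empty] at ha)
    (by rw [show (PySem.Set.empty : PySem.Set String) = [] from rfl, Wgt_nil]; simp [fuelB]; omega) x]
  simp [PySem.Set.empty]

theorem tdL_nodup (d : List (String × List String)) (c : String) : (tdL d c).Nodup :=
  collectB_nodup _ _ _ _ List.nodup_nil

theorem tdL_keys (d : List (String × List String)) (c : String) :
    ∀ x ∈ tdL d c, (pvKeys d).contains x = true :=
  collectB_keys _ _ _ _ (by intro a ha; simp [PySem.Set.empty] at ha)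

-- ---- A's recursion deletes exactly the reachable set ----
def NoLoop (d : List (String × List String)) (cur : String) : Prop :=
  ∀ k, PR d cur k → ∀ nb ∈ pvGet d k, ¬ PR d nb k

theorem foldl_filter_del (L : List String) (d : List (String × List String)) :
    L.foldl (fun acc n => acc.filter (fun p => !(p.1 == n))) d =
      d.filter (fun p => !(L.contains p.1)) := by
  induction L generalizing d with
  | nil => simp
  | cons l L ih =>
    simp only [List.foldl_cons]
    rw [ih, List.filter_filter]
    apply List.filter_congr
    intro p _
    simp only [List.contains_cons]
    cases h1 : (p.1 == l) <;> cases h2 : L.contains p.1 <;> simp_all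

theorem delRecA_eq (f : Nat) (d : List (String × List String)) (cur : String)
    (hnd : (pvKeys d).Nodup) (hnl : NoLoop d cur) (hf : (tdL d cur).length + 1 ≤ f) :
    delRecA f d cur = d.filter (fun p => !((tdL d cur).contains p.1)) := by
  induction f generalizing d cur with
  | zero => omega
  | succ f ihf =>
    by_cases hk : (pvKeys d).contains cur = true
    · simp only [delRecA]
      rw [if_pos hk]
      have hcur_mem : cur ∈ tdL d cur := (tdL_mem hnd).mpr (PR.refl cur hk)
      have inner : ∀ nbs : List String, (∀ nb ∈ nbs, nb ∈ pvGet d cur) → ∀ U : List String,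
          (∀ x ∈ U, PR d cur x ∧ x ≠ cur) → FwdClosed d U →
          ∃ U' : List String, (∀ x, x ∈ U' ↔ x ∈ U ∨ ∃ nb ∈ nbs, PR d nb x) ∧
            (∀ x ∈ U', PR d cur x ∧ x ≠ cur) ∧ FwdClosed d U' ∧
            nbs.foldl (fun acc nb => delRecA f acc nb) (d.filter (fun p => !(U.contains p.1))) =
              d.filter (fun p => !(U'.contains p.1)) := by
        intro nbs
        induction nbs with
        | nil =>
          intro _ U hU1 hU2
          exact ⟨U, by simp, hU1, hU2, rfl⟩
        | cons nb nbs ihn =>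
          intro hsub U hU1 hU2
          have hnb : nb ∈ pvGet d cur := hsub nb (by simp)
          have hndacc : (pvKeys (d.filter (fun p => !(U.contains p.1)))).Nodup := by
            rw [pvKeys_filter]; exact hnd.filter _
          have hcurnot : ∀ y, PR (d.filter (fun p => !(U.contains p.1))) nb y → y ≠ cur := by
            intro y hy hyc
            rw [hyc] at hy
            exact hnl cur (PR.refl cur hk) nb hnb (PR_mono hy)
          have hnlacc : NoLoop (d.filter (fun p => !(U.contains p.1))) nb := by
            intro k hkreach m hm hcon
            have hkd : PR d cur k := PR.step cur nb k hk hnb (PR_mono hkreach)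
            have hkkey := PR_dst_key hkreach
            rw [pvKeys_filter] at hkkey
            have hkU : U.contains k = false := by
              have := List.of_mem_filter (List.contains_iff_mem.mp hkkey)
              simpa using this
            rw [pvGet_filter hkU] at hm
            exact hnl k hkd m hm (PR_mono hcon)
          have hfuelacc : (tdL (d.filter (fun p => !(U.contains p.1))) nb).length + 1 ≤ f := by
            have hsubset : ∀ x ∈ tdL (d.filter (fun p => !(U.contains p.1))) nb, x ∈ tdL d cur := by
              intro x hx
              exact (tdL_mem hnd).mpr (PR.step cur nb x hk hnb (PR_mono ((tdL_mem hndacc).mp hx)))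
            have hcne : cur ∉ tdL (d.filter (fun p => !(U.contains p.1))) nb := by
              intro hc
              exact (hcurnot cur ((tdL_mem hndacc).mp hc)) rfl
            have := nodup_len_lt (tdL_nodup _ nb) (tdL_nodup d cur) hsubset cur hcur_mem hcne
            omega
          have hstep := ihf (d.filter (fun p => !(U.contains p.1))) nb hndacc hnlacc hfuelacc
          have hcomb : (d.filter (fun p => !(U.contains p.1))).filter
                (fun p => !((tdL (d.filter (fun p => !(U.contains p.1))) nb).contains p.1)) =
              d.filter (fun p => !((U ++ tdL (d.filter (fun p => !(U.contains p.1))) nb).contains p.1)) := by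
            rw [List.filter_filter]
            apply List.filter_congr
            intro p _
            cases h1 : U.contains p.1 <;>
              cases h2 : (tdL (d.filter (fun p => !(U.contains p.1))) nb).contains p.1 <;>
                rw [List.contains_append, h1, h2] <;> rfl
          have hU1' : ∀ x ∈ U ++ tdL (d.filter (fun p => !(U.contains p.1))) nb,
              PR d cur x ∧ x ≠ cur := by
            intro x hx
            rcases List.mem_append.mp hx with h1 | h1
            · exact hU1 x h1
            · have hr := (tdL_mem hndacc).mp h1
              exact ⟨PR.step cur nb x hk hnb (PR_mono hr), hcurnot x hr⟩
          have hU2' : FwdClosed d (U ++ tdL (d.filter (fun p => !(U.contains p.1))) nb) := by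
            intro u hu y hy
            rcases List.mem_append.mp hu with h1 | h1
            · exact List.mem_append.mpr (Or.inl (hU2 u h1 y hy))
            · rcases PR_drop hU2 hy with h2 | h2
              · exact List.mem_append.mpr (Or.inl h2)
              · refine List.mem_append.mpr (Or.inr ((tdL_mem hndacc).mpr ?_))
                exact PR_trans ((tdL_mem hndacc).mp h1) h2
          obtain ⟨U', hmem, hU1'', hU2'', heq⟩ :=
            ihn (fun m hm => hsub m (List.mem_cons_of_mem _ hm))
              (U ++ tdL (d.filter (fun p => !(U.contains p.1))) nb) hU1' hU2'
          refine ⟨U', ?_, hU1'', hU2'', ?_⟩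
          · intro x
            rw [hmem x]
            constructor
            · rintro (hx | ⟨m, hm, hpm⟩)
              · rcases List.mem_append.mp hx with h1 | h1
                · exact Or.inl h1
                · exact Or.inr ⟨nb, by simp, PR_mono ((tdL_mem hndacc).mp h1)⟩
              · exact Or.inr ⟨m, List.mem_cons_of_mem _ hm, hpm⟩
            · rintro (hx | ⟨m, hm, hpm⟩)
              · exact Or.inl (List.mem_append.mpr (Or.inl hx))
              · rcases List.mem_cons.mp hm with h1 | h1
                · rw [h1] at hpm
                  rcases PR_drop hU2 hpm with h2 | h2
                  · exact Or.inl (List.mem_append.mpr (Or.inl h2))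
                  · exact Or.inl (List.mem_append.mpr (Or.inr ((tdL_mem hndacc).mpr h2)))
                · exact Or.inr ⟨m, h1, hpm⟩
          · simp only [List.foldl_cons]
            rw [hstep, hcomb]
            exact heq
      obtain ⟨U', hmem, _, _, heq⟩ := inner (pvGet d cur) (fun _ h => h) []
        (by intro x hx; cases hx) (by intro u hu; cases hu)
      have hbase : d.filter (fun p => !(([] : List String).contains p.1)) = d := by simp
      rw [hbase] at heq
      rw [heq, List.filter_filter]
      apply List.filter_congr
      intro p _
      have hiff : p.1 ∈ tdL d cur ↔ (p.1 = cur ∨ p.1 ∈ U') := by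
        rw [tdL_mem hnd, PR_unfold hk]
        constructor
        · rintro (h | ⟨m, hm, hpm⟩)
          · exact Or.inl h
          · exact Or.inr ((hmem p.1).mpr (Or.inr ⟨m, hm, hpm⟩))
        · rintro (rfl | h)
          · exact Or.inl rfl
          · rcases (hmem p.1).mp h with h1 | h1
            · cases h1
            · exact Or.inr h1
      have hbool : (tdL d cur).contains p.1 = ((p.1 == cur) || U'.contains p.1) := by
        apply Bool.eq_iff_iff.mpr
        constructor
        · intro h
          rcases hiff.mp (List.contains_iff_mem.mp h) with h1 | h1
          · simp [h1]
          · rw [List.contains_iff_mem.mpr h1, Bool.or_true]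
        · intro h
          rcases Bool.or_eq_true _ _ |>.mp h with h1 | h1
          · exact List.contains_iff_mem.mpr (hiff.mpr (Or.inl (by simpa using h1)))
          · exact List.contains_iff_mem.mpr (hiff.mpr (Or.inr (List.contains_iff_mem.mp h1)))
      rw [hbool]
      cases h1 : (p.1 == cur) <;> cases h2 : U'.contains p.1 <;> rfl
    · simp only [delRecA]
      rw [if_neg hk]
      symm
      apply List.filter_eq_self.mpr
      intro p hp
      have : (tdL d cur).contains p.1 = false := by
        cases hq : (tdL d cur).contains p.1
        · rfl
        · exact absurd (PR_src_key ((tdL_mem hnd).mp (List.contains_iff_mem.mp hq))) hk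
      rw [this]
      rfl

-- ===== VERDICT (by name: the statement is the Claim_ definition above) =====
theorem delete_node_and_children_spec : Claim_equal_delete_node_and_children := by
  intro d node _ hpre
  unfold Spec_delete_node_and_children
  obtain ⟨hnd, hacyc⟩ := hpre
  unfold delete_node_and_children delete_node_and_children_alt
  by_cases hk : (pvKeys d).contains node = true
  · rw [if_pos hk, if_pos hk]
    have hA : delRecA (d.length + 1) d node =
        d.filter (fun p => !((tdL d node).contains p.1)) := by
      apply delRecA_eq _ _ _ hnd
      · intro k hpk nb hnb hcon
        exact hacyc k (pvReach_iff.mpr hpk) nb hnb (pvReach_iff.mpr hcon)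
      · have hsub : ∀ x ∈ tdL d node, x ∈ pvKeys d := by
          intro x hx
          exact List.contains_iff_mem.mp (tdL_keys d node x hx)
        have := nodup_len_le (tdL_nodup d node) hsub
        have hlen : (pvKeys d).length = d.length := List.length_map ..
        omega
    have hB := foldl_filter_del (tdL d node) d
    exact congrArg (List.map _) (hA.trans hB.symm)
  · rw [if_neg hk, if_neg hk]
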